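-- pv_equiv track=rewrite | github.com/ashtonbt1/stratl | django/league/views.py | generate_init_vals_roll_results
-- ===== SOURCE A (Python) =====
-- def generate_init_vals_roll_results(pk):
--     ilist = list()
--     nforms = 66
--     nrows = 11
--     for i in range(nforms):
--         col = int(i / nrows) + 1
--         row = (i % nrows) + 2
--         form_dict = {
--             'card': pk,
--             'column': col,
--             'd6_roll': row
--         }
--         ilist.append(form_dict)
--     return ilist
-- ===== SOURCE B (Python) =====
-- def generate_init_vals_roll_results(pk):
--     return [
--         {'card': pk, 'column': col, 'd6_roll': row}
--         for col in range(1, 7)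
--         for row in range(2, 13)
--     ]
-- ===== Notes on version B (the rewrite author's own statement) =====
-- stated objective: simpler
-- what changed: Replaces the flat loop over range(66) with quotient/remainder index arithmetic by a nested comprehension over the explicit grid (columns 1-6, rows 2-12) in the same order.
import Mathlib
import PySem

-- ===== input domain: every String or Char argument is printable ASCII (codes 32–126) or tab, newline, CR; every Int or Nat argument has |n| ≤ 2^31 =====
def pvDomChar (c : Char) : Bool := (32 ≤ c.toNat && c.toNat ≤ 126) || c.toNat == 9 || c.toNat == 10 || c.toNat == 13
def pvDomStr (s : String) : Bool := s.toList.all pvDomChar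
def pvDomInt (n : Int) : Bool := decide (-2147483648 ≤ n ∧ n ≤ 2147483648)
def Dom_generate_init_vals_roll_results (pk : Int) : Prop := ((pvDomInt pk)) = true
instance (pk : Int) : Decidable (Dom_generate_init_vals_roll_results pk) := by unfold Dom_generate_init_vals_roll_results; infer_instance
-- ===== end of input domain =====

-- B: the flat range(66) loop with index arithmetic is replaced by a nested grid comprehension (simpler).


-- ===== PORT A =====
-- note: int(i/11) in A truncates toward zero; for i in range(66) (i ≥ 0) this equals floor division, ported as PySem.Int.floordiv
def generate_init_vals_roll_results (pk : Int) : List (List (String × Int)) :=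
  (PySem.List.pyRange 0 66 1).foldl
    (fun ilist i =>
      ilist ++ [[("card", pk),
                 ("column", PySem.Int.floordiv i 11 + 1),
                 ("d6_roll", PySem.Int.mod i 11 + 2)]]) []

-- ===== PORT B =====
-- B: nested comprehension over the explicit grid, columns 1..6 then rows 2..12
def generate_init_vals_roll_results_alt (pk : Int) : List (List (String × Int)) :=
  (PySem.List.pyRange 1 7 1).flatMap (fun col =>
    (PySem.List.pyRange 2 13 1).map (fun row =>
      [("card", pk), ("column", col), ("d6_roll", row)]))

-- ===== PRECONDITION & SPEC =====
def Spec_generate_init_vals_roll_results (pk : Int) (out : List (List (String × Int))) : Prop := out = generate_init_vals_roll_results_alt pk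
instance (pk : Int) (out : List (List (String × Int))) : Decidable (Spec_generate_init_vals_roll_results pk out) := by unfold Spec_generate_init_vals_roll_results; infer_instance

-- ===== CLAIM (what is proved, stated in full; the proofs are below) =====
def Claim_equal_generate_init_vals_roll_results : Prop := ∀ (pk : Int), Dom_generate_init_vals_roll_results pk → Spec_generate_init_vals_roll_results pk (generate_init_vals_roll_results pk)

-- ===== LEMMAS AND PROOFS =====

-- ===== VERDICT (by name: the statement is the Claim_ definition above) =====
theorem generate_init_vals_roll_results_spec : Claim_equal_generate_init_vals_roll_results := by
  intro pk _
  unfold Spec_generate_init_vals_roll_results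
  simp [generate_init_vals_roll_results, generate_init_vals_roll_results_alt,
        PySem.List.pyRange, PySem.Int.floordiv, PySem.Int.mod, List.range_succ]
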